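-- pv_equiv track=rewrite | github.com/srones/Subset-Sum-Project | project5.py | bestNeighbor_1opt
-- ===== SOURCE A (Python) =====
-- def soln2sum(instance: list[int], solution: list[int]):
--
--     sum = 0
--     for i in range(len(solution)):
--         if solution[i] == 1:
--             sum += instance[i]
--
--     return sum
--
-- def bestNeighbor_1opt(instance: list[int], target: int, init_sln: list[int]):
--
--     bestSolution = init_sln
--     bestSum = soln2sum(instance, init_sln)
--
--     # add or remove each element
--     for i in range(len(init_sln)):
--
--         new_solution = init_sln.copy()
--
--         if new_solution[i] == 1:
--             new_solution[i] = 0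
--         else:
--             new_solution[i] = 1
--
--         newSum = soln2sum(instance, new_solution)
--
--         if abs(newSum - target) < abs(bestSum - target):
--             bestSolution = new_solution.copy()
--             bestSum = newSum
--
--     return bestSolution, bestSum
-- ===== SOURCE B (Python) =====
-- def bestNeighbor_1opt(instance: list[int], target: int, init_sln: list[int]):
--     # O(n): compute the base sum once; each neighbor's sum is base +/- instance[i].
--     base = 0
--     for v, x in zip(init_sln, instance):
--         if v == 1:
--             base += x
--     bestSum = base
--     bestIdx = None
--     for i in range(len(init_sln)):
--         s = base - instance[i] if init_sln[i] == 1 else base + instance[i]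
--         if abs(s - target) < abs(bestSum - target):
--             bestSum = s
--             bestIdx = i
--     if bestIdx is None:
--         return init_sln, bestSum
--     sol = init_sln.copy()
--     sol[bestIdx] = 0 if sol[bestIdx] == 1 else 1
--     return sol, bestSum
-- ===== Notes on version B (the rewrite author's own statement) =====
-- stated objective: faster
-- what changed: Instead of copying the solution and re-summing it with soln2sum for every flip (O(n) per neighbor), B computes the base sum once and derives each neighbor's sum incrementally as base +/- instance[i], tracking only the best index and materialising the flipped list once at the end.
import Mathlib
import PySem

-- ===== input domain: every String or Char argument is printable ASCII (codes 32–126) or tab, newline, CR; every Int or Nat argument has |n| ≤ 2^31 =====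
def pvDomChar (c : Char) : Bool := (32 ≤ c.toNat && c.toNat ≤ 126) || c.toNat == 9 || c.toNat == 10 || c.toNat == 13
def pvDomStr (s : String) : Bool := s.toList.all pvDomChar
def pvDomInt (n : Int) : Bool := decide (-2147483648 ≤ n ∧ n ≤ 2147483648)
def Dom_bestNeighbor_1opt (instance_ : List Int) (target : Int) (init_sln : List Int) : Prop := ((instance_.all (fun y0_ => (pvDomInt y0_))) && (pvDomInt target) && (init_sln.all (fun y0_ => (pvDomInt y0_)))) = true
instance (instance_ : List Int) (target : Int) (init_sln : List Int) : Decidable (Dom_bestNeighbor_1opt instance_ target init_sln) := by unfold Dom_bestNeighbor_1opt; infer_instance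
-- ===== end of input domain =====

-- B computes the base sum once and each neighbor sum incrementally (O(n) vs A's O(n^2)); same return value.

-- ===== PORT A =====
def soln2sum (instance_ : List Int) (solution : List Int) : Int :=
  (PySem.List.pyRange 0 solution.length 1).foldl
    (fun s i =>
      if PySem.List.pyGetD solution i 0 == 1 then s + PySem.List.pyGetD instance_ i 0 else s) 0

def bestNeighbor_1opt (instance_ : List Int) (target : Int) (init_sln : List Int) : List Int × Int :=
  (PySem.List.pyRange 0 init_sln.length 1).foldl
    (fun st i =>
      let new_solution :=
        if PySem.List.pyGetD init_sln i 0 == 1 then PySem.List.pySetD init_sln i 0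
        else PySem.List.pySetD init_sln i 1
      let newSum := soln2sum instance_ new_solution
      if |newSum - target| < |st.2 - target| then (new_solution, newSum) else st)
    (init_sln, soln2sum instance_ init_sln)

-- ===== PORT B =====
def bestNeighbor_1opt_alt (instance_ : List Int) (target : Int) (init_sln : List Int) : List Int × Int :=
  let base := (init_sln.zip instance_).foldl (fun s p => if p.1 == 1 then s + p.2 else s) 0
  let st := (PySem.List.pyRange 0 init_sln.length 1).foldl
    (fun (st : Int × Option Int) i =>
      let s := if PySem.List.pyGetD init_sln i 0 == 1 then base - PySem.List.pyGetD instance_ i 0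
               else base + PySem.List.pyGetD instance_ i 0
      if |s - target| < |st.1 - target| then (s, some i) else st)
    (base, none)
  match st.2 with
  | none => (init_sln, st.1)
  | some j =>
    (if PySem.List.pyGetD init_sln j 0 == 1 then PySem.List.pySetD init_sln j 0
     else PySem.List.pySetD init_sln j 1, st.1)

-- ===== PRECONDITION & SPEC =====
-- A raises IndexError (instance_[i] out of range) whenever init_sln is longer than instance_; B raises there too.
def Pre_bestNeighbor_1opt (instance_ : List Int) (target : Int) (init_sln : List Int) : Prop :=
  init_sln.length ≤ instance_.length
instance (instance_ : List Int) (target : Int) (init_sln : List Int) : Decidable (Pre_bestNeighbor_1opt instance_ target init_sln) := by unfold Pre_bestNeighbor_1opt; infer_instance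

def pvWitness_bestNeighbor_1opt : List Int × Int × List Int := ([3, 5, 2], 6, [1, 0, 1])

def Spec_bestNeighbor_1opt (instance_ : List Int) (target : Int) (init_sln : List Int) (out : List Int × Int) : Prop := out = bestNeighbor_1opt_alt instance_ target init_sln
instance (instance_ : List Int) (target : Int) (init_sln : List Int) (out : List Int × Int) : Decidable (Spec_bestNeighbor_1opt instance_ target init_sln out) := by unfold Spec_bestNeighbor_1opt; infer_instance

-- ===== CLAIM (what is proved, stated in full; the proofs are below) =====
def Claim_equal_bestNeighbor_1opt : Prop := ∀ (instance_ : List Int) (target : Int) (init_sln : List Int), Dom_bestNeighbor_1opt instance_ target init_sln → Pre_bestNeighbor_1opt instance_ target init_sln → Spec_bestNeighbor_1opt instance_ target init_sln (bestNeighbor_1opt instance_ target init_sln)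

-- ===== LEMMAS AND PROOFS =====

-- the 0/1-weighted sum, structurally
def zsum : List Int → List Int → Int
  | [], _ => 0
  | _, [] => 0
  | v :: vs, x :: xs => (if v == 1 then x else 0) + zsum vs xs

theorem zsum_eq_rangeFold (sol : List Int) : ∀ (inst : List Int) (acc : Int), sol.length ≤ inst.length →
    (List.range sol.length).foldl
      (fun s k => if sol.getD k 0 == 1 then s + inst.getD k 0 else s) acc = acc + zsum sol inst := by
  induction sol with
  | nil => intro inst acc _; simp [zsum]
  | cons v vs ih =>
    intro inst acc h
    cases inst with
    | nil => simp at h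
    | cons x xs =>
      simp only [List.length_cons, List.range_succ_eq_map, List.foldl_cons, List.foldl_map,
        List.getD_cons_zero, List.getD_cons_succ, zsum]
      rw [ih xs _ (by simpa using h)]
      by_cases hv : v == 1 <;> simp [hv] <;> ring

theorem zsum_eq_zipFold (sol : List Int) : ∀ (inst : List Int) (acc : Int),
    (sol.zip inst).foldl (fun s p => if p.1 == 1 then s + p.2 else s) acc = acc + zsum sol inst := by
  induction sol with
  | nil => intro inst acc; simp [zsum]
  | cons v vs ih =>
    intro inst acc
    cases inst with
    | nil => simp [zsum]
    | cons x xs =>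
      simp only [List.zip_cons_cons, List.foldl_cons, zsum]
      rw [ih xs]
      by_cases hv : v == 1 <;> simp [hv] <;> ring

theorem soln2sum_eq_zsum (inst sol : List Int) (h : sol.length ≤ inst.length) :
    soln2sum inst sol = zsum sol inst := by
  unfold soln2sum
  rw [PySem.List.pyRange_zero_nat, List.foldl_map]
  simpa using zsum_eq_rangeFold sol inst 0 h

theorem zsum_set (k : Nat) : ∀ (sol inst : List Int) (v : Int), k < sol.length → sol.length ≤ inst.length →
    zsum (sol.set k v) inst =
      zsum sol inst - (if sol.getD k 0 == 1 then inst.getD k 0 else 0)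
        + (if v == 1 then inst.getD k 0 else 0) := by
  induction k with
  | zero =>
    intro sol inst v hk h
    cases sol with
    | nil => simp at hk
    | cons a as =>
      cases inst with
      | nil => simp at h
      | cons x xs => simp [zsum]; ring
  | succ k ih =>
    intro sol inst v hk h
    cases sol with
    | nil => simp at hk
    | cons a as =>
      cases inst with
      | nil => simp at h
      | cons x xs =>
        simp only [List.set_cons_succ, zsum, List.getD_cons_succ]
        rw [ih as xs v (by simpa using hk) (by simpa using h)]
        ring

-- B's final-state decoding: the solution A carries along, from B's best index
def stateOf (init_sln : List Int) (st : Int × Option Int) : List Int × Int :=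
  match st.2 with
  | none => (init_sln, st.1)
  | some j =>
    (if PySem.List.pyGetD init_sln j 0 == 1 then PySem.List.pySetD init_sln j 0
     else PySem.List.pySetD init_sln j 1, st.1)

theorem flip_sum (inst init : List Int) (k : Nat) (hk : k < init.length) (h : init.length ≤ inst.length) :
    zsum (if init.getD k 0 == 1 then init.set k 0 else init.set k 1) inst =
      (if init.getD k 0 == 1 then zsum init inst - inst.getD k 0 else zsum init inst + inst.getD k 0) := by
  by_cases hv : init.getD k 0 == 1
  · rw [if_pos hv, if_pos hv, zsum_set k init inst 0 hk h, if_pos hv]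
    simp
  · rw [if_neg hv, if_neg hv, zsum_set k init inst 1 hk h, if_neg hv]
    simp

theorem loop_commute (inst init : List Int) (target : Int)
    (h : init.length ≤ inst.length) :
    ∀ (l : List Nat) (st : Int × Option Int), (∀ k ∈ l, k < init.length) →
    l.foldl
      (fun st (k : Nat) =>
        if |soln2sum inst (if init.getD k 0 == 1 then init.set k 0 else init.set k 1) - target|
            < |st.2 - target| then
          ((if init.getD k 0 == 1 then init.set k 0 else init.set k 1),
           soln2sum inst (if init.getD k 0 == 1 then init.set k 0 else init.set k 1))
        else st)
      (stateOf init st)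
    = stateOf init
      (l.foldl
        (fun (st : Int × Option Int) (k : Nat) =>
          if |(if init.getD k 0 == 1 then zsum init inst - inst.getD k 0
               else zsum init inst + inst.getD k 0) - target| < |st.1 - target| then
            ((if init.getD k 0 == 1 then zsum init inst - inst.getD k 0
              else zsum init inst + inst.getD k 0), (some (k : Int)))
          else st)
        st) := by
  intro l
  induction l with
  | nil => intro st _; rfl
  | cons k ks ih =>
    intro st hmem
    have hk : k < init.length := hmem k (List.mem_cons_self)
    simp only [List.foldl_cons]
    have hsum : soln2sum inst (if init.getD k 0 == 1 then init.set k 0 else init.set k 1)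
        = (if init.getD k 0 == 1 then zsum init inst - inst.getD k 0
           else zsum init inst + inst.getD k 0) := by
      rw [soln2sum_eq_zsum inst _ (by split <;> simpa using h)]
      exact flip_sum inst init k hk h
    have hsnd : (stateOf init st).2 = st.1 := by
      cases hst : st.2 <;> simp [stateOf, hst]
    rw [hsum, hsnd]
    by_cases hlt : |(if init.getD k 0 == 1 then zsum init inst - inst.getD k 0
        else zsum init inst + inst.getD k 0) - target| < |st.1 - target|
    · rw [if_pos hlt, if_pos hlt]
      have : ((if init.getD k 0 == 1 then init.set k 0 else init.set k 1),
          (if init.getD k 0 == 1 then zsum init inst - inst.getD k 0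
           else zsum init inst + inst.getD k 0))
          = stateOf init ((if init.getD k 0 == 1 then zsum init inst - inst.getD k 0
              else zsum init inst + inst.getD k 0), some (k : Int)) := by
        simp [stateOf, PySem.List.pyGetD_natCast, PySem.List.pySetD_natCast]
      rw [this]
      exact ih _ (fun j hj => hmem j (List.mem_cons_of_mem _ hj))
    · rw [if_neg hlt, if_neg hlt]
      exact ih _ (fun j hj => hmem j (List.mem_cons_of_mem _ hj))

-- ===== VERDICT (by name: the statement is the Claim_ definition above) =====
theorem bestNeighbor_1opt_spec : Claim_equal_bestNeighbor_1opt := by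
  intro inst target init _ hpre
  unfold Spec_bestNeighbor_1opt bestNeighbor_1opt bestNeighbor_1opt_alt
  have hbase : (init.zip inst).foldl (fun s p => if p.1 == 1 then s + p.2 else s) 0
      = zsum init inst := by simpa using zsum_eq_zipFold init inst 0
  have hA : (init, soln2sum inst init) = stateOf init (zsum init inst, (none : Option Int)) := by
    simp [stateOf, soln2sum_eq_zsum inst init hpre]
  simp only [hbase, PySem.List.pyRange_zero_nat, List.foldl_map,
    PySem.List.pyGetD_natCast, PySem.List.pySetD_natCast, hA]
  rw [loop_commute inst init target hpre _ _ (fun k hk => List.mem_range.mp hk)]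
  rfl
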